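-- pv_equiv track=rewrite | github.com/MaksymilianBaczewski/INFORMATYKA3 | CKE61.py | zadanie_61_1
-- ===== SOURCE A (Python) =====
-- def zadanie_61_1(ciagi):
--     count = 0
--     max_diff = 0
--     for ciag in ciagi:
--         diff = ciag[1] - ciag[0]
--         for i in range(2, len(ciag)):
--             if ciag[i] - ciag[i-1] != diff:
--                 break
--         else:
--             count += 1
--             if diff > max_diff:
--                 max_diff = diff
--     return count, max_diff
-- ===== SOURCE B (Python) =====
-- def zadanie_61_1(ciagi):
--     count = 0
--     max_diff = 0
--     for ciag in ciagi:
--         d = ciag[1] - ciag[0]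
--         if ciag == [ciag[0] + i * d for i in range(len(ciag))]:
--             count += 1
--             if d > max_diff:
--                 max_diff = d
--     return count, max_diff
-- ===== Notes on version B (the rewrite author's own statement) =====
-- stated objective: alternative
-- what changed: B reconstructs, for each sequence, the ideal arithmetic sequence determined by its first element and first step and compares it for whole-list equality with the input, instead of A's early-breaking scan over consecutive differences.
import Mathlib
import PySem

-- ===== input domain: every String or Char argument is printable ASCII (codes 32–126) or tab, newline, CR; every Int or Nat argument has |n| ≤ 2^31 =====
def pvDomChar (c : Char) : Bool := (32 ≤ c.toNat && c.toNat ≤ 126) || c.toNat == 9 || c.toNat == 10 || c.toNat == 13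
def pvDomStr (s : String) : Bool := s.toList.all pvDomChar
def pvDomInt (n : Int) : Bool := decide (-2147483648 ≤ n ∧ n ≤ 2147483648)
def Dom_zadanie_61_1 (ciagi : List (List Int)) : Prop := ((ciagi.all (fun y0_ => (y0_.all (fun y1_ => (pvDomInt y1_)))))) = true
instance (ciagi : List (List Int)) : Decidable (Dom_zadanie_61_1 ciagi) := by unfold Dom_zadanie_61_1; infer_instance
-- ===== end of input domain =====

-- B tests each sequence by reconstructing the ideal arithmetic sequence from its first
-- element and first step and comparing whole-list equality, instead of A's diff scan.

-- ===== PORT A =====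
-- inner 'for i in range(2, len(ciag)): if … != diff: break / else: …' as a recursion
-- returning whether the loop completed without break
def pvInnerA (ciag : List Int) (diff : Int) (i : Nat) : Bool :=
  if _h : i < ciag.length then
    if PySem.List.pyGetD ciag (i : Int) 0 - PySem.List.pyGetD ciag ((i : Int) - 1) 0 ≠ diff then
      false
    else
      pvInnerA ciag diff (i + 1)
  else true
termination_by ciag.length - i

def pvStepA (acc : Int × Int) (ciag : List Int) : Int × Int :=
  let diff := PySem.List.pyGetD ciag 1 0 - PySem.List.pyGetD ciag 0 0
  if pvInnerA ciag diff 2 then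
    (acc.1 + 1, if diff > acc.2 then diff else acc.2)
  else acc

def zadanie_61_1 (ciagi : List (List Int)) : Int × Int :=
  ciagi.foldl pvStepA (0, 0)

-- ===== PORT B =====
def pvStepB (acc : Int × Int) (ciag : List Int) : Int × Int :=
  let d := PySem.List.pyGetD ciag 1 0 - PySem.List.pyGetD ciag 0 0
  let expected := (List.range ciag.length).map
    (fun (i : Nat) => PySem.List.pyGetD ciag 0 0 + (i : Int) * d)
  if ciag == expected then
    (acc.1 + 1, if d > acc.2 then d else acc.2)
  else acc

def zadanie_61_1_alt (ciagi : List (List Int)) : Int × Int :=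
  ciagi.foldl pvStepB (0, 0)

-- ===== PRECONDITION & SPEC =====
-- Both A and B raise IndexError on any sequence of length < 2 (via ciag[1] - ciag[0]);
-- Pre_ excludes exactly those inputs.
def Pre_zadanie_61_1 (ciagi : List (List Int)) : Prop :=
  ∀ ciag ∈ ciagi, 2 ≤ ciag.length
instance (ciagi : List (List Int)) : Decidable (Pre_zadanie_61_1 ciagi) := by
  unfold Pre_zadanie_61_1; infer_instance
def pvWitness_zadanie_61_1 : List (List Int) := [[1, 3, 5], [2, 2, 1], [4, 4]]

def Spec_zadanie_61_1 (ciagi : List (List Int)) (out : Int × Int) : Prop := out = zadanie_61_1_alt ciagi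
instance (ciagi : List (List Int)) (out : Int × Int) : Decidable (Spec_zadanie_61_1 ciagi out) := by unfold Spec_zadanie_61_1; infer_instance

-- ===== CLAIM (what is proved, stated in full; the proofs are below) =====
def Claim_equal_zadanie_61_1 : Prop := ∀ (ciagi : List (List Int)), Dom_zadanie_61_1 ciagi → Pre_zadanie_61_1 ciagi → Spec_zadanie_61_1 ciagi (zadanie_61_1 ciagi)

-- ===== LEMMAS AND PROOFS =====

-- A's inner loop characterised: it completes without break iff every comparison from
-- index i onward matches diff.
lemma pvInnerA_iff (l : List Int) (diff : Int) :
    ∀ n i, 1 ≤ i → l.length - i = n →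
      (pvInnerA l diff i = true ↔
        ∀ j, i ≤ j → j < l.length → l.getD j 0 - l.getD (j - 1) 0 = diff) := by
  intro n
  induction n with
  | zero =>
    intro i hi hn
    rw [pvInnerA]
    have h : ¬ i < l.length := by omega
    simp only [h]
    constructor
    · intro _ j hij hj; omega
    · intro _; rfl
  | succ n ih =>
    intro i hi hn
    have h : i < l.length := by omega
    rw [pvInnerA]
    simp only [h, dif_pos, ite_not]
    have hcast : ((i : Int) - 1) = ((i - 1 : Nat) : Int) := by omega
    rw [hcast, PySem.List.pyGetD_natCast, PySem.List.pyGetD_natCast]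
    by_cases heq : l.getD i 0 - l.getD (i - 1) 0 = diff
    · simp only [heq, if_true]
      rw [ih (i + 1) (by omega) (by omega)]
      constructor
      · intro hall j hij hj
        rcases Nat.eq_or_lt_of_le hij with rfl | hlt
        · exact heq
        · exact hall j hlt hj
      · intro hall j hij hj; exact hall j (by omega) hj
    · simp only [if_neg heq]
      constructor
      · intro hc; exact absurd hc (by simp)
      · intro hall; exact absurd (hall i le_rfl h) heq

-- from the consecutive-difference property, every element has the affine closed form
lemma pvAffine_of_diffs (l : List Int) (d : Int) (_hl : 2 ≤ l.length)
    (hd : l.getD 1 0 - l.getD 0 0 = d)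
    (hall : ∀ j, 2 ≤ j → j < l.length → l.getD j 0 - l.getD (j - 1) 0 = d) :
    ∀ i, i < l.length → l.getD i 0 = l.getD 0 0 + (i : Int) * d := by
  intro i
  induction i with
  | zero => intro _; simp
  | succ k ih =>
    intro hk
    have hk' : k < l.length := by omega
    have hkeq := ih hk'
    rcases Nat.eq_zero_or_pos k with rfl | hpos
    · push_cast; linarith [hd]
    · have := hall (k + 1) (by omega) hk
      have h1 : k + 1 - 1 = k := by omega
      rw [h1] at this
      push_cast
      linarith [hkeq, this]

-- whole-list equality with the reconstructed sequence iff consecutive differences match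
lemma pvEq_expected_iff (l : List Int) (d : Int) (hl : 2 ≤ l.length)
    (hd : l.getD 1 0 - l.getD 0 0 = d) :
    (l = (List.range l.length).map (fun (i : Nat) => l.getD 0 0 + (i : Int) * d) ↔
      ∀ j, 2 ≤ j → j < l.length → l.getD j 0 - l.getD (j - 1) 0 = d) := by
  constructor
  · intro heq j h2 hj
    have hget : ∀ i, i < l.length → l.getD i 0 = l.getD 0 0 + (i : Int) * d := by
      intro i hi
      have hi' : i < ((List.range l.length).map
          (fun (i : Nat) => l.getD 0 0 + (i : Int) * d)).length := by simpa using hi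
      rw [List.getD_eq_getElem?_getD]
      conv_lhs => rw [heq]
      rw [List.getElem?_eq_getElem hi', Option.getD_some, List.getElem_map,
        List.getElem_range]
    rw [hget j hj, hget (j - 1) (by omega)]
    have hcast : ((j : Int)) - ((j - 1 : Nat) : Int) = 1 := by omega
    linear_combination d * hcast
  · intro hall
    have hget := pvAffine_of_diffs l d hl hd hall
    apply List.ext_getElem
    · simp
    · intro i h1 h2
      have hi : i < l.length := h1
      rw [List.getElem_map, List.getElem_range]
      have := hget i hi
      rwa [List.getD_eq_getElem?_getD, List.getElem?_eq_getElem hi,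
        Option.getD_some] at this

lemma pvStep_eq (acc : Int × Int) (ciag : List Int) (h : 2 ≤ ciag.length) :
    pvStepA acc ciag = pvStepB acc ciag := by
  simp only [pvStepA, pvStepB]
  set diff := PySem.List.pyGetD ciag 1 0 - PySem.List.pyGetD ciag 0 0 with hdiff
  have hd0 : PySem.List.pyGetD ciag 1 0 = ciag.getD 1 0 := by
    simpa using PySem.List.pyGetD_natCast ciag 1 0
  have hd1 : PySem.List.pyGetD ciag 0 0 = ciag.getD 0 0 := by
    simpa using PySem.List.pyGetD_natCast ciag 0 0
  have hdval : ciag.getD 1 0 - ciag.getD 0 0 = diff := by rw [hdiff, hd0, hd1]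
  have hbool : pvInnerA ciag diff 2 =
      (ciag == (List.range ciag.length).map
        (fun (i : Nat) => PySem.List.pyGetD ciag 0 0 + (i : Int) * diff)) := by
    rw [Bool.eq_iff_iff, beq_iff_eq, hd1,
      pvInnerA_iff ciag diff (ciag.length - 2) 2 (by omega) rfl,
      pvEq_expected_iff ciag diff h hdval]
  rw [hbool]

theorem pv_fold_eq (ciagi : List (List Int)) (h : ∀ ciag ∈ ciagi, 2 ≤ ciag.length) :
    ciagi.foldl pvStepA (0, 0) = ciagi.foldl pvStepB (0, 0) := by
  apply PySem.List.foldl_congr_mem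
  exact fun acc x hx => pvStep_eq acc x (h x hx)

-- ===== VERDICT (by name: the statement is the Claim_ definition above) =====
theorem zadanie_61_1_spec : Claim_equal_zadanie_61_1 := by
  intro ciagi _ hpre
  unfold Spec_zadanie_61_1 zadanie_61_1 zadanie_61_1_alt
  exact pv_fold_eq ciagi hpre
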